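-- pv_equiv track=rewrite | github.com/hakkoda/python-practice | timer/timer.py | generate_times
-- ===== SOURCE A (Python) =====
-- def generate_times(minutes):
--     times = []
--
--     minute = minutes
--     second = 0
--     times.append( "{:02} : {:02}\n".format(minute, second) )
--
--     for minute in range(minutes-1, -1, -1):
--         for second in range(59, -1, -1):
--             time_entry = "{:02} : {:02}\n".format(minute, second)
--             times.append(time_entry)
--
--     return times
-- ===== SOURCE B (Python) =====
-- def generate_times(minutes):
--     times = ["{:02} : {:02}\n".format(minutes, 0)]
--     for t in range(minutes * 60 - 1, -1, -1):
--         times.append("{:02} : {:02}\n".format(t // 60, t % 60))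
--     return times
-- ===== Notes on version B (the rewrite author's own statement) =====
-- stated objective: simpler
-- what changed: Replaces the nested minute/second countdown loops with a single flat loop over total seconds from minutes*60-1 down to 0, recovering minute and second by divmod.
import Mathlib
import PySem

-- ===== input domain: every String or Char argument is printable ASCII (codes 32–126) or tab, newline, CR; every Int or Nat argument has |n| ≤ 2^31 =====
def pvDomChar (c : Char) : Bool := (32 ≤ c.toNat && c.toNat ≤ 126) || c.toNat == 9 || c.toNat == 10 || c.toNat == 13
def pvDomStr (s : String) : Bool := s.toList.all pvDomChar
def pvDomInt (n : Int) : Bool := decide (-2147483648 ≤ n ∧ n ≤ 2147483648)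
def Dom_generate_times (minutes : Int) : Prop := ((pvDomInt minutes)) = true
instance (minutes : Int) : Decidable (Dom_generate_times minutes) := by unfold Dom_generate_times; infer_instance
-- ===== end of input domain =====

-- B replaces A's nested minute/second countdown loops by one flat loop over total seconds with divmod (simpler decomposition, same cost).


-- shared helper: the format string "{:02} : {:02}\n" (zero-pad to width 2; str(n) is shorter than 2 only for 0..9)
def pvPad02 (n : Int) : String :=
  if 0 ≤ n ∧ n < 10 then "0" ++ PySem.Int.toStr n else PySem.Int.toStr n

def pvFmt (a b : Int) : String := pvPad02 a ++ " : " ++ pvPad02 b ++ "\n"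

-- ===== PORT A =====
def generate_times (minutes : Int) : List String :=
  let times : List String := []
  let times := times ++ [pvFmt minutes 0]
  (PySem.List.pyRange (minutes - 1) (-1) (-1)).foldl
    (fun acc minute =>
      (PySem.List.pyRange 59 (-1) (-1)).foldl
        (fun acc2 second => acc2 ++ [pvFmt minute second]) acc)
    times

-- ===== PORT B =====
def generate_times_alt (minutes : Int) : List String :=
  (PySem.List.pyRange (minutes * 60 - 1) (-1) (-1)).foldl
    (fun acc t => acc ++ [pvFmt (PySem.Int.floordiv t 60) (PySem.Int.mod t 60)])
    [pvFmt minutes 0]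

-- ===== PRECONDITION & SPEC =====
def Spec_generate_times (minutes : Int) (out : List String) : Prop := out = generate_times_alt minutes
instance (minutes : Int) (out : List String) : Decidable (Spec_generate_times minutes out) := by unfold Spec_generate_times; infer_instance

-- ===== CLAIM (what is proved, stated in full; the proofs are below) =====
def Claim_equal_generate_times : Prop := ∀ (minutes : Int), Dom_generate_times minutes → Spec_generate_times minutes (generate_times minutes)

-- ===== LEMMAS AND PROOFS =====

-- one minute-block of A equals the corresponding 60 entries of B's flat range
lemma pv_block (n : Nat) :
    (PySem.List.pyRange (60 * (n : Int) + 59) (60 * (n : Int) - 1) (-1)).map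
        (fun t => pvFmt (PySem.Int.floordiv t 60) (PySem.Int.mod t 60))
      = (PySem.List.pyRange 59 (-1) (-1)).map (fun s => pvFmt (n : Int) s) := by
  rw [PySem.List.pyRange_neg_one, PySem.List.pyRange_neg_one]
  have h1 : ((60 * (n : Int) + 59) - (60 * (n : Int) - 1)).toNat = 60 := by omega
  have h2 : ((59 : Int) - (-1)).toNat = 60 := by omega
  rw [h1, h2, List.map_map, List.map_map]
  refine List.map_congr_left (fun k hk => ?_)
  have hk60 : k < 60 := List.mem_range.mp hk
  simp only [Function.comp]
  have ht : (60 * (n : Int) + 59 - (k : Int)) = (n : Int) * 60 + (59 - (k : Int)) := by ring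
  have hfd : PySem.Int.floordiv (60 * (n : Int) + 59 - (k : Int)) 60 = (n : Int) := by
    rw [PySem.Int.floordiv_eq_iff_of_pos (by omega)]
    constructor <;> omega
  have hmd : PySem.Int.mod (60 * (n : Int) + 59 - (k : Int)) 60 = 59 - (k : Int) := by
    have := PySem.Int.floordiv_mul_add_mod (60 * (n : Int) + 59 - (k : Int)) 60
    rw [hfd] at this; omega
  rw [hfd, hmd]

-- the flattened nested loops equal the flat divmod map, for minutes = n : Nat
lemma pv_key (n : Nat) :
    (PySem.List.pyRange ((n : Int) - 1) (-1) (-1)).flatMap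
        (fun minute => (PySem.List.pyRange 59 (-1) (-1)).map (fun s => pvFmt minute s))
      = (PySem.List.pyRange ((n : Int) * 60 - 1) (-1) (-1)).map
        (fun t => pvFmt (PySem.Int.floordiv t 60) (PySem.Int.mod t 60)) := by
  induction n with
  | zero =>
      rw [show PySem.List.pyRange ((0 : Nat) - 1 : Int) (-1) (-1) = [] from
            PySem.List.pyRange_neg_one_eq_nil (by omega),
          show PySem.List.pyRange ((0 : Nat) * 60 - 1 : Int) (-1) (-1) = [] from
            PySem.List.pyRange_neg_one_eq_nil (by omega)]
      rfl
  | succ m ih =>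
      have hcast : ((m + 1 : Nat) : Int) = (m : Int) + 1 := by push_cast; ring
      rw [hcast]
      have hL : ((m : Int) + 1) - 1 = (m : Int) := by ring
      rw [hL, show PySem.List.pyRange ((m : Int)) (-1) (-1)
            = ((m : Int)) :: PySem.List.pyRange ((m : Int) - 1) (-1) (-1) from
            PySem.List.pyRange_neg_one_cons (by omega), List.flatMap_cons]
      -- split B's range: top 60 entries ++ rest
      have hsplit : PySem.List.pyRange (((m : Int) + 1) * 60 - 1) (-1) (-1)
          = PySem.List.pyRange (60 * (m : Int) + 59) (60 * (m : Int) - 1) (-1)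
            ++ PySem.List.pyRange ((m : Int) * 60 - 1) (-1) (-1) := by
        rw [PySem.List.pyRange_neg_one_eq_reverse, PySem.List.pyRange_neg_one_eq_reverse,
            PySem.List.pyRange_neg_one_eq_reverse]
        rw [show ((m : Int) + 1) * 60 - 1 + 1 = 60 * (m : Int) + 59 + 1 by ring]
        rw [PySem.List.pyRange_one_append (-1 + 1) (60 * (m : Int) - 1 + 1)
              (60 * (m : Int) + 59 + 1) (by omega) (by omega)]
        rw [List.reverse_append, show ((m : Int)) * 60 - 1 + 1 = 60 * (m : Int) - 1 + 1 by ring]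
      rw [hsplit, List.map_append, pv_block, ih]

-- rewrite A's nested folds and B's fold into flatMap/map form
lemma pv_A_eq (minutes : Int) :
    generate_times minutes
      = [pvFmt minutes 0]
        ++ (PySem.List.pyRange (minutes - 1) (-1) (-1)).flatMap
             (fun minute => (PySem.List.pyRange 59 (-1) (-1)).map (fun s => pvFmt minute s)) := by
  unfold generate_times
  simp only [List.nil_append, PySem.List.foldl_append_singleton_eq_map]
  rw [PySem.List.foldl_append_eq_flatMap]

lemma pv_B_eq (minutes : Int) :
    generate_times_alt minutes
      = [pvFmt minutes 0]
        ++ (PySem.List.pyRange (minutes * 60 - 1) (-1) (-1)).map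
            (fun t => pvFmt (PySem.Int.floordiv t 60) (PySem.Int.mod t 60)) := by
  unfold generate_times_alt
  rw [PySem.List.foldl_append_singleton_eq_map]

-- ===== VERDICT (by name: the statement is the Claim_ definition above) =====
theorem generate_times_spec : Claim_equal_generate_times := by
  intro minutes _
  unfold Spec_generate_times
  rw [pv_A_eq, pv_B_eq]
  rcases le_or_gt minutes 0 with hle | hpos
  · rw [show PySem.List.pyRange (minutes - 1) (-1) (-1) = [] from
          PySem.List.pyRange_neg_one_eq_nil (by omega),
        show PySem.List.pyRange (minutes * 60 - 1) (-1) (-1) = [] from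
          PySem.List.pyRange_neg_one_eq_nil (by omega)]
    rfl
  · have hn : minutes = ((minutes.toNat : Nat) : Int) := by omega
    rw [hn]
    rw [pv_key minutes.toNat]
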